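-- pv_equiv track=rewrite | github.com/tikhomirovd/Tinkoff_ADS | Python/Contest 1/O. find_swaps.py | find_swap
-- ===== SOURCE A (Python) =====
-- def find_swap(arr):
--     for i in range(len(arr)):
--         if i % 2 == 0 and arr[i] % 2 == 1:  # нечетная позиция, четное число
--             for j in range(1, len(arr), 2):  # ищем нечетное число на четной позиции
--                 if arr[j] % 2 == 0:
--                     return i + 1, j + 1
--         elif i % 2 == 1 and arr[i] % 2 == 0:  # четная позиция, нечетное число
--             for j in range(0, len(arr), 2):  # ищем четное число на нечетной позиции
--                 if arr[j] % 2 == 1: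
--                     return i + 1, j + 1
--     return -1, -1
-- ===== SOURCE B (Python) =====
-- def find_swap(arr):
--     # One pass: remember the first odd value at an even index (e) and the
--     # first even value at an odd index (o); combine them at the end.
--     e = o = None
--     for i, x in enumerate(arr):
--         if x % 2 == 1:
--             if i % 2 == 0 and e is None:
--                 e = i
--         else:
--             if i % 2 == 1 and o is None:
--                 o = i
--         if e is not None and o is not None:
--             break
--     if e is not None and o is not None:
--         return (e + 1, o + 1) if e < o else (o + 1, e + 1)
--     return -1, -1
-- ===== Notes on version B (the rewrite author's own statement) =====
-- stated objective: faster
-- what changed: Replaces the nested rescan (for each misplaced element, scan the whole array for a partner) by a single enumerate pass that records the first odd-value-at-even-index and first even-value-at-odd-index and combines the two in O(1).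
import Mathlib
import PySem

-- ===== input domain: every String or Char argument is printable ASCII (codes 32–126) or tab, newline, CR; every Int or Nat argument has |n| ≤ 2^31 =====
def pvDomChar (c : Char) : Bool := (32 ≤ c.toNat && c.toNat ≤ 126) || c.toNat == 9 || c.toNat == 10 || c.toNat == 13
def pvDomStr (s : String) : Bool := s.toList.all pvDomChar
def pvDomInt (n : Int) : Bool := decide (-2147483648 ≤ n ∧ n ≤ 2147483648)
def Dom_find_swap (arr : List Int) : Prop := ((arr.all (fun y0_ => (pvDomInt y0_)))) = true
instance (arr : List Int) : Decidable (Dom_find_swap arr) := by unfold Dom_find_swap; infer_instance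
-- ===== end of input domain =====

-- B replaces A's nested rescan by one pass recording the two first mismatches (measured faster in a timing run).

-- ===== PORT A =====
-- inner loop 'for j in range(s, len(arr), 2): if arr[j] % 2 == want: return j'
def pvFirstJ (arr : List Int) (js : List Int) (want : Int) : Option Int :=
  match js with
  | [] => none
  | j :: rest =>
    if PySem.Int.mod (PySem.List.pyGetD arr j 0) 2 = want then some j
    else pvFirstJ arr rest want

-- outer loop 'for i in range(len(arr)): …'
def pvALoop (arr : List Int) (is_ : List Int) : List Int :=
  match is_ with
  | [] => [-1, -1]
  | i :: rest =>
    if PySem.Int.mod i 2 = 0 ∧ PySem.Int.mod (PySem.List.pyGetD arr i 0) 2 = 1 then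
      match pvFirstJ arr (PySem.List.pyRange 1 (arr.length : Int) 2) 0 with
      | some j => [i + 1, j + 1]
      | none => pvALoop arr rest
    else if PySem.Int.mod i 2 = 1 ∧ PySem.Int.mod (PySem.List.pyGetD arr i 0) 2 = 0 then
      match pvFirstJ arr (PySem.List.pyRange 0 (arr.length : Int) 2) 1 with
      | some j => [i + 1, j + 1]
      | none => pvALoop arr rest
    else pvALoop arr rest

def find_swap (arr : List Int) : List Int :=
  pvALoop arr (PySem.List.pyRange 0 (arr.length : Int) 1)

-- ===== PORT B =====
-- single pass 'for i, x in enumerate(arr)' keeping e (first odd value at even index) and o (first even value at odd index), breaking once both are set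
def pvBScan (l : List Int) (i : Int) (e o : Option Int) : Option Int × Option Int :=
  match l with
  | [] => (e, o)
  | x :: rest =>
    let e' := if PySem.Int.mod x 2 = 1 then
                (if PySem.Int.mod i 2 = 0 ∧ e = none then some i else e) else e
    let o' := if PySem.Int.mod x 2 = 1 then o
              else (if PySem.Int.mod i 2 = 1 ∧ o = none then some i else o)
    if e'.isSome ∧ o'.isSome then (e', o') else pvBScan rest (i + 1) e' o'

def find_swap_alt (arr : List Int) : List Int :=
  match pvBScan arr 0 none none with
  | (some e, some o) => if e < o then [e + 1, o + 1] else [o + 1, e + 1]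
  | _ => [-1, -1]

-- ===== PRECONDITION & SPEC =====
def Spec_find_swap (arr : List Int) (out : List Int) : Prop := out = find_swap_alt arr
instance (arr : List Int) (out : List Int) : Decidable (Spec_find_swap arr out) := by unfold Spec_find_swap; infer_instance

-- ===== CLAIM (what is proved, stated in full; the proofs are below) =====
def Claim_equal_find_swap : Prop := ∀ (arr : List Int), Dom_find_swap arr → Spec_find_swap arr (find_swap arr)

-- ===== LEMMAS AND PROOFS =====

-- first index ≥ i (walking l) whose index parity is par and whose value parity is 1 - par
def pvFMA (l : List Int) (i : Int) (par : Int) : Option Int :=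
  match l with
  | [] => none
  | x :: rest =>
    if PySem.Int.mod i 2 = par ∧ PySem.Int.mod x 2 = 1 - par then some i
    else pvFMA rest (i + 1) par

def pvFM (arr : List Int) (k : Nat) (par : Int) : Option Int := pvFMA (arr.drop k) (k : Int) par

-- the common normal form both loops compute
def pvGoF (Ek Ok Eg Og : Option Int) : List Int :=
  match Ek, Ok with
  | none, none => [-1, -1]
  | some ek, none => match Og with | some o => [ek + 1, o + 1] | none => [-1, -1]
  | none, some _ok => match Eg with | some e => [_ok + 1, e + 1] | none => [-1, -1]
  | some ek, some ok =>
    if ek < ok then (match Og with | some o => [ek + 1, o + 1] | none => [-1, -1])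
    else (match Eg with | some e => [ok + 1, e + 1] | none => [-1, -1])

theorem pvRange_two_nil {a b : Int} (h : b ≤ a) : PySem.List.pyRange a b 2 = [] := by
  rw [PySem.List.pyRange_of_pos a b (by norm_num)]
  rw [if_neg (by omega)]
  rfl

theorem pvRange_two_cons {a b : Int} (h : a < b) :
    PySem.List.pyRange a b 2 = a :: PySem.List.pyRange (a + 2) b 2 := by
  rw [PySem.List.pyRange_of_pos a b (by norm_num), PySem.List.pyRange_of_pos (a + 2) b (by norm_num)]
  rw [if_pos h]
  have hN : ((b - a + 2 - 1) / 2).toNat = (if a + 2 < b then ((b - (a + 2) + 2 - 1) / 2).toNat else 0) + 1 := by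
    split_ifs with h2 <;> omega
  rw [hN, List.range_succ_eq_map]
  simp [List.map_map, Function.comp_def]
  intro k _
  ring

theorem pvModCast (k : Nat) : PySem.Int.mod (k : Int) 2 = ((k % 2 : Nat) : Int) := by
  exact_mod_cast PySem.Int.mod_natCast k 2

theorem pvFM_nil {arr : List Int} {k : Nat} (h : arr.length ≤ k) (par : Int) :
    pvFM arr k par = none := by
  unfold pvFM
  rw [List.drop_eq_nil_of_le h]
  rfl

theorem pvFM_cons {arr : List Int} {k : Nat} (h : k < arr.length) (par : Int) :
    pvFM arr k par =
      (if PySem.Int.mod (k : Int) 2 = par ∧ PySem.Int.mod (arr.getD k 0) 2 = 1 - par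
       then some (k : Int) else pvFM arr (k + 1) par) := by
  unfold pvFM
  rw [List.drop_eq_getElem_cons h]
  rw [List.getD_eq_getElem arr 0 h]
  simp only [pvFMA]
  push_cast
  rfl

theorem pvFM_skip {arr : List Int} {k : Nat} {par : Int}
    (h : ¬ (PySem.Int.mod (k : Int) 2 = par ∧ PySem.Int.mod (arr.getD k 0) 2 = 1 - par)) :
    pvFM arr k par = pvFM arr (k + 1) par := by
  by_cases hk : k < arr.length
  · rw [pvFM_cons hk, if_neg h]
  · rw [pvFM_nil (by omega) par, pvFM_nil (by omega) par]

theorem pvFM_none_succ {arr : List Int} {k : Nat} {par : Int}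
    (h : pvFM arr k par = none) : pvFM arr (k + 1) par = none := by
  by_cases hk : k < arr.length
  · rw [pvFM_cons hk par] at h
    split_ifs at h with hc
    exact h
  · exact pvFM_nil (by omega) par

theorem pvFM_none_all {arr : List Int} {par : Int}
    (h : pvFM arr 0 par = none) : ∀ k, pvFM arr k par = none := by
  intro k
  induction k with
  | zero => exact h
  | succ n ih => exact pvFM_none_succ ih

theorem pvFMA_le {l : List Int} : ∀ {i par j : Int}, pvFMA l i par = some j → i ≤ j := by
  induction l with
  | nil => intro i par j h; simp [pvFMA] at h
  | cons x rest ih =>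
    intro i par j h
    simp only [pvFMA] at h
    split_ifs at h with hc
    · simp only [Option.some.injEq] at h; omega
    · have := ih h; omega

theorem pvFM_le {arr : List Int} {k : Nat} {par j : Int}
    (h : pvFM arr k par = some j) : (k : Int) ≤ j := pvFMA_le h

-- the inner loop over indices k, k+2, … finds the first type-par mismatch at or after k
theorem pvFirstJ_eq (arr : List Int) (par : Int) :
    ∀ d k, (k : Nat) % 2 = par.toNat → (par = 0 ∨ par = 1) → arr.length - k = d →
      pvFirstJ arr (PySem.List.pyRange (k : Int) (arr.length : Int) 2) (1 - par) = pvFM arr k par := by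
  intro d
  induction d using Nat.strong_induction_on with
  | _ d ih =>
    intro k hk hpar hd
    by_cases hlt : k < arr.length
    · rw [pvRange_two_cons (by exact_mod_cast hlt)]
      simp only [pvFirstJ, PySem.List.pyGetD_natCast]
      have hkpar : PySem.Int.mod (k : Int) 2 = par := by
        rw [pvModCast, hk]; rcases hpar with h | h <;> simp [h]
      by_cases hv : PySem.Int.mod (arr.getD k 0) 2 = 1 - par
      · rw [if_pos hv, pvFM_cons hlt, if_pos ⟨hkpar, hv⟩]
      · rw [if_neg hv]
        have hcast : (k : Int) + 2 = ((k + 2 : Nat) : Int) := by push_cast; ring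
        rw [hcast, ih (arr.length - (k + 2)) (by omega) (k + 2) (by omega) hpar rfl]
        rw [pvFM_cons hlt, if_neg (by tauto)]
        refine (pvFM_skip ?_).symm
        rw [pvModCast]
        rintro ⟨hc, -⟩
        rcases hpar with h | h <;> subst h <;> omega
    · rw [pvRange_two_nil (by exact_mod_cast Nat.le_of_not_lt hlt), pvFM_nil (by omega) par]
      rfl

-- B's single pass computes exactly the two first mismatches
theorem pvBScan_eq (l : List Int) : ∀ (i : Int) (e o : Option Int),
    pvBScan l i e o = ((match e with | some a => some a | none => pvFMA l i 0),
                       (match o with | some b => some b | none => pvFMA l i 1)) := by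
  induction l with
  | nil => intro i e o; cases e <;> cases o <;> simp [pvBScan, pvFMA]
  | cons x rest ih =>
    intro i e o
    simp only [pvBScan]
    rcases PySem.Int.mod_two_eq x with hx | hx <;> rcases PySem.Int.mod_two_eq i with hi | hi <;>
      cases e <;> cases o <;>
      simp only [hx, hi, ih, pvFMA] <;> norm_num <;> simp

-- A's outer loop from index k computes pvGoF of the local and global first mismatches
theorem pvALoop_eq (arr : List Int) :
    ∀ d k, arr.length - k = d →
      pvALoop arr (PySem.List.pyRange (k : Int) (arr.length : Int) 1) =
        pvGoF (pvFM arr k 0) (pvFM arr k 1) (pvFM arr 0 0) (pvFM arr 0 1) := by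
  intro d
  induction d using Nat.strong_induction_on with
  | _ d ih =>
    intro k hd
    by_cases hlt : k < arr.length
    · rw [PySem.List.pyRange_one_cons (by exact_mod_cast hlt)]
      simp only [pvALoop, PySem.List.pyGetD_natCast]
      have hinner1 : pvFirstJ arr (PySem.List.pyRange 1 (arr.length : Int) 2) 0 = pvFM arr 0 1 := by
        have h1 := pvFirstJ_eq arr 1 (arr.length - 1) 1 (by norm_num) (Or.inr rfl) rfl
        norm_num at h1
        rw [h1]
        symm
        apply pvFM_skip
        simp
      have hinner0 : pvFirstJ arr (PySem.List.pyRange 0 (arr.length : Int) 2) 1 = pvFM arr 0 0 := by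
        have h0 := pvFirstJ_eq arr 0 (arr.length - 0) 0 (by norm_num) (Or.inl rfl) rfl
        norm_num at h0
        exact h0
      have hrec : pvALoop arr (PySem.List.pyRange ((k : Int) + 1) (arr.length : Int) 1) =
          pvGoF (pvFM arr (k + 1) 0) (pvFM arr (k + 1) 1) (pvFM arr 0 0) (pvFM arr 0 1) := by
        have hcast : (k : Int) + 1 = ((k + 1 : Nat) : Int) := by push_cast; ring
        rw [hcast]
        exact ih (arr.length - (k + 1)) (by omega) (k + 1) rfl
      rcases Nat.even_or_odd k with hke | hko
      · -- k even
        have hk0 : k % 2 = 0 := Nat.even_iff.mp hke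
        have hkpar : PySem.Int.mod (k : Int) 2 = 0 := by rw [pvModCast, hk0]; rfl
        rcases PySem.Int.mod_two_eq (arr.getD k 0) with hv | hv
        · -- value even: no mismatch at k
          rw [if_neg (by simp only [hv]; norm_num), if_neg (by simp only [hkpar]; norm_num),
              pvFM_skip (arr := arr) (k := k) (par := 0) (by simp only [hv]; norm_num),
              pvFM_skip (arr := arr) (k := k) (par := 1) (by simp only [hkpar]; norm_num), hrec]
        · -- value odd: E-type mismatch at k
          rw [if_pos ⟨hkpar, hv⟩, hinner1]
          have hEk : pvFM arr k 0 = some (k : Int) := by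
            rw [pvFM_cons hlt 0]; exact if_pos ⟨hkpar, by rw [hv]; norm_num⟩
          have hOk : pvFM arr k 1 = pvFM arr (k + 1) 1 := pvFM_skip (by simp only [hkpar]; norm_num)
          rcases hOg : pvFM arr 0 1 with _ | o
          · have hO1 : pvFM arr (k + 1) 1 = none := pvFM_none_all hOg (k + 1)
            rw [hOg, hO1] at hrec
            simp only [hrec, hEk, hOk, hO1]
            rcases pvFM arr (k + 1) 0 with _ | z <;> rfl
          · simp only [hEk, hOk]
            rcases hOk1 : pvFM arr (k + 1) 1 with _ | ok
            · simp [pvGoF]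
            · have hle := pvFM_le hOk1
              simp only [pvGoF]
              rw [if_pos (by push_cast at hle ⊢; omega)]
      · -- k odd
        have hk1 : k % 2 = 1 := Nat.odd_iff.mp hko
        have hkpar : PySem.Int.mod (k : Int) 2 = 1 := by rw [pvModCast, hk1]; rfl
        rcases PySem.Int.mod_two_eq (arr.getD k 0) with hv | hv
        · -- value even: O-type mismatch at k
          rw [if_neg (by simp only [hkpar]; norm_num), if_pos ⟨hkpar, hv⟩, hinner0]
          have hOk : pvFM arr k 1 = some (k : Int) := by
            rw [pvFM_cons hlt 1]; exact if_pos ⟨hkpar, by rw [hv]; norm_num⟩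
          have hEk : pvFM arr k 0 = pvFM arr (k + 1) 0 := pvFM_skip (by simp only [hkpar]; norm_num)
          rcases hEg : pvFM arr 0 0 with _ | e
          · have hE1 : pvFM arr (k + 1) 0 = none := pvFM_none_all hEg (k + 1)
            rw [hEg, hE1] at hrec
            simp only [hrec, hOk, hEk, hE1]
            rcases pvFM arr (k + 1) 1 with _ | z <;> rfl
          · simp only [hOk, hEk]
            rcases hEk1 : pvFM arr (k + 1) 0 with _ | ek
            · simp [pvGoF]
            · have hle := pvFM_le hEk1
              simp only [pvGoF]
              rw [if_neg (by push_cast at hle ⊢; omega)]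
        · -- value odd: no mismatch at k
          rw [if_neg (by simp only [hkpar]; norm_num), if_neg (by simp only [hv]; norm_num),
              pvFM_skip (arr := arr) (k := k) (par := 0) (by simp only [hkpar]; norm_num),
              pvFM_skip (arr := arr) (k := k) (par := 1) (by simp only [hv]; norm_num), hrec]
    · rw [PySem.List.pyRange_one_eq_nil (by exact_mod_cast Nat.le_of_not_lt hlt)]
      rw [pvFM_nil (by omega) 0, pvFM_nil (by omega) 1]
      rfl

-- ===== VERDICT (by name: the statement is the Claim_ definition above) =====
theorem find_swap_spec : Claim_equal_find_swap := by
  intro arr _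
  unfold Spec_find_swap find_swap find_swap_alt
  have hA := pvALoop_eq arr arr.length 0 rfl
  rw [show ((0 : Nat) : Int) = 0 from rfl] at hA
  rw [hA, pvBScan_eq arr 0 none none]
  have e0 : pvFMA arr 0 0 = pvFM arr 0 0 := by unfold pvFM; simp
  have e1 : pvFMA arr 0 1 = pvFM arr 0 1 := by unfold pvFM; simp
  simp only [e0, e1]
  rcases pvFM arr 0 0 with _ | e <;> rcases pvFM arr 0 1 with _ | o <;>
    simp only [pvGoF]
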